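-- pv_equiv track=rewrite | github.com/julgitt/University_tasks | sztuczna_inteligencja/pracownia3/zad1/main.py | get_all_line_uncertain_indexes
-- ===== SOURCE A (Python) =====
-- def get_all_line_uncertain_indexes(domains, is_col, index):
--     uncertain_line_cells = set()
--     line_cells_on = set()
--     line_cells_off = set()
--     for i, bit in enumerate(domains[is_col][index][0]):
--         uncertain_line_cells.add(i)
--         if bit == 1:
--             line_cells_on.add(i)
--         elif bit == 0:
--             line_cells_off.add(i)
--
--     for example_solution in domains[is_col][index][1:]:
--         for i, bit in enumerate(example_solution):
--             if bit == 1: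
--                 try:
--                     line_cells_off.remove(i)
--                 except KeyError:
--                     pass
--             elif bit == 0:
--                 try:
--                     line_cells_on.remove(i)
--                 except KeyError:
--                     pass
--
--     uncertain_line_cells.difference_update(line_cells_on)
--     uncertain_line_cells.difference_update(line_cells_off)
--     return uncertain_line_cells
-- ===== SOURCE B (Python) =====
-- def get_all_line_uncertain_indexes(domains, is_col, index):
--     solutions = domains[is_col][index]
--     first = solutions[0]
--     rest = solutions[1:]
--     uncertain = set()
--     for i, v in enumerate(first):
--         if v == 1:
--             certain = all(not (i < len(s) and s[i] == 0) for s in rest)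
--         elif v == 0:
--             certain = all(not (i < len(s) and s[i] == 1) for s in rest)
--         else:
--             certain = False
--         if not certain:
--             uncertain.add(i)
--     return uncertain
-- ===== Notes on version B (the rewrite author's own statement) =====
-- stated objective: simpler
-- what changed: A builds three mutable sets (all indices, certain-on, certain-off), erases from them while streaming every later solution, and finally subtracts; B drops the set-subtraction machinery entirely and decides each index of the first solution directly with one index-major scan of the later solutions (a cell is uncertain iff its first-solution bit is not 0/1, or some later solution carries the opposite bit at that position).
import Mathlib
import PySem

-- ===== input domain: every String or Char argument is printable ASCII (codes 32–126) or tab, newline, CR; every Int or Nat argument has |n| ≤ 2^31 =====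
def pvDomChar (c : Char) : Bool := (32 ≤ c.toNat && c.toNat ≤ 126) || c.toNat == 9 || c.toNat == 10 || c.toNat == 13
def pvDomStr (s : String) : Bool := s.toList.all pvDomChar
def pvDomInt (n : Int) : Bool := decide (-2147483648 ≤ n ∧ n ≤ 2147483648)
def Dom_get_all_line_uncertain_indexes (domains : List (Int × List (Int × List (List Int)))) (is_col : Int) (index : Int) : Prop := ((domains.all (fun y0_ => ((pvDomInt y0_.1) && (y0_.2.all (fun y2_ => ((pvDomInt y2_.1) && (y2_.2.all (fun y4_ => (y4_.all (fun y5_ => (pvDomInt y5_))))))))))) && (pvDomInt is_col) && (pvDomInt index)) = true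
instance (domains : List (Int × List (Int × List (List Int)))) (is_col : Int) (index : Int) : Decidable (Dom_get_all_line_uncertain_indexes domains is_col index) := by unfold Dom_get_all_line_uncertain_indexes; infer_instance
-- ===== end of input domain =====

-- B replaces A's three mutable sets and final set subtractions by a direct index-major
-- scan deciding each cell of the first solution on its own (objective: simpler).

-- ===== PORT A =====
-- literal port of A: build uncertain/on/off sets from the first solution, stream the
-- remaining solutions erasing flipped positions (try/remove/except pass = Set.discard),
-- then subtract.  On KeyError/IndexError inputs (excluded by Pre_) the port returns [].
def get_all_line_uncertain_indexes (domains : List (Int × List (Int × List (List Int)))) (is_col : Int) (index : Int) : List Int :=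
  match (List.lookup is_col domains).bind (fun row => List.lookup index row) with
  | none => []  -- Python raises KeyError here; excluded by Pre_
  | some sols =>
    match PySem.List.pyGet? sols 0 with
    | none => []  -- Python raises IndexError here (empty solution list); excluded by Pre_
    | some first =>
      let st0 :=
        (PySem.List.enumerate first 0).foldl
          (fun (st : PySem.Set Int × PySem.Set Int × PySem.Set Int) p =>
            let u := PySem.Set.add st.1 p.1
            if p.2 == 1 then (u, PySem.Set.add st.2.1 p.1, st.2.2)
            else if p.2 == 0 then (u, st.2.1, PySem.Set.add st.2.2 p.1)
            else (u, st.2.1, st.2.2))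
          (PySem.Set.empty, PySem.Set.empty, PySem.Set.empty)
      let onoff :=
        (PySem.List.slice sols (some 1) none).foldl
          (fun (st : PySem.Set Int × PySem.Set Int) sol =>
            (PySem.List.enumerate sol 0).foldl
              (fun (st2 : PySem.Set Int × PySem.Set Int) p =>
                if p.2 == 1 then (st2.1, PySem.Set.discard st2.2 p.1)
                else if p.2 == 0 then (PySem.Set.discard st2.1 p.1, st2.2)
                else st2)
              st)
          (st0.2.1, st0.2.2)
      PySem.Set.diff (PySem.Set.diff st0.1 onoff.1) onoff.2

-- ===== PORT B =====
-- Source B's per-cell test: with bit v at index i of the first solution, the cell is certain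
-- iff v is 0/1 and no later solution carries the opposite bit at i (s[i] is guarded by
-- i < len(s), so pyGetD is exact here).
def altCertain (rest : List (List Int)) (i : Int) (v : Int) : Bool :=
  if v == 1 then rest.all (fun s => !(decide (i < (s.length : Int)) && (PySem.List.pyGetD s i 0 == 0)))
  else if v == 0 then rest.all (fun s => !(decide (i < (s.length : Int)) && (PySem.List.pyGetD s i 0 == 1)))
  else false

def get_all_line_uncertain_indexes_alt (domains : List (Int × List (Int × List (List Int)))) (is_col : Int) (index : Int) : List Int :=
  match (List.lookup is_col domains).bind (fun row => List.lookup index row) with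
  | none => []  -- Python raises KeyError here; excluded by Pre_
  | some sols =>
    match PySem.List.pyGet? sols 0 with
    | none => []  -- Python raises IndexError here; excluded by Pre_
    | some first =>
      let rest := PySem.List.slice sols (some 1) none
      (PySem.List.enumerate first 0).foldl
        (fun (acc : PySem.Set Int) p => if altCertain rest p.1 p.2 then acc else PySem.Set.add acc p.1)
        PySem.Set.empty

-- ===== PRECONDITION & SPEC =====
-- Pre_ excludes exactly the inputs where Python A raises: is_col missing from domains or
-- index missing from domains[is_col] (KeyError), or an empty solution list (IndexError on [0]).
def Pre_get_all_line_uncertain_indexes (domains : List (Int × List (Int × List (List Int)))) (is_col : Int) (index : Int) : Prop :=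
  (((List.lookup is_col domains).bind (fun row => List.lookup index row)).getD []) ≠ []
instance (domains : List (Int × List (Int × List (List Int)))) (is_col : Int) (index : Int) : Decidable (Pre_get_all_line_uncertain_indexes domains is_col index) := by unfold Pre_get_all_line_uncertain_indexes; infer_instance

def pvWitness_get_all_line_uncertain_indexes : (List (Int × List (Int × List (List Int)))) × Int × Int :=
  ([(0, [(0, [[1, 0], [1, 1]])])], 0, 0)

def Spec_get_all_line_uncertain_indexes (domains : List (Int × List (Int × List (List Int)))) (is_col : Int) (index : Int) (out : List Int) : Prop := out = get_all_line_uncertain_indexes_alt domains is_col index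
instance (domains : List (Int × List (Int × List (List Int)))) (is_col : Int) (index : Int) (out : List Int) : Decidable (Spec_get_all_line_uncertain_indexes domains is_col index out) := by unfold Spec_get_all_line_uncertain_indexes; infer_instance

-- ===== CLAIM (what is proved, stated in full; the proofs are below) =====
def Claim_equal_get_all_line_uncertain_indexes : Prop := ∀ (domains : List (Int × List (Int × List (List Int)))) (is_col : Int) (index : Int), Dom_get_all_line_uncertain_indexes domains is_col index → Pre_get_all_line_uncertain_indexes domains is_col index → Spec_get_all_line_uncertain_indexes domains is_col index (get_all_line_uncertain_indexes domains is_col index)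

-- ===== LEMMAS AND PROOFS =====

-- "bit w occurs at position i" in one later solution, as A's streaming erasures see it
def pvFlip (w : Int) (i : Int) (s : List Int) : Bool :=
  (PySem.List.enumerate s 0).any (fun p => (p.2 == w) && (p.1 == i))

-- indices in an fst-increasing pair list are unique keys
theorem pvFstInj {l : List (Int × Int)} (hl : l.Pairwise (fun a b => a.1 < b.1))
    {p q : Int × Int} (hp : p ∈ l) (hq : q ∈ l) (h : p.1 = q.1) : p = q := by
  induction l with
  | nil => cases hp
  | cons x xs ih =>
    rcases List.pairwise_cons.mp hl with ⟨hx, hxs⟩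
    rcases List.mem_cons.mp hp with hp1 | hp1 <;> rcases List.mem_cons.mp hq with hq1 | hq1
    · rw [hp1, hq1]
    · exfalso; have := hx q hq1; rw [hp1] at h; omega
    · exfalso; have := hx p hp1; rw [hq1] at h; omega
    · exact ih hxs hp1 hq1

theorem pvAddNotMem (s : List Int) (x : Int) (h : x ∉ s) : PySem.Set.add s x = s ++ [x] := by
  simp [PySem.Set.add, PySem.Set.contains, h]

theorem pvDiscardFilter (s : List Int) (x : Int) :
    PySem.Set.discard s x = s.filter (fun y => y != x) := rfl

theorem pvDiffFilter (s t : List Int) :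
    PySem.Set.diff s t = s.filter (fun y => !t.contains y) := rfl

-- membership of an index in the fst-projection of a filtered fst-increasing list
theorem pvMemFstFilter {l : List (Int × Int)} (hl : l.Pairwise (fun a b => a.1 < b.1))
    (f : Int × Int → Bool) {p : Int × Int} (hp : p ∈ l) :
    p.1 ∈ (l.filter f).map (·.1) ↔ f p = true := by
  constructor
  · intro h
    rcases List.mem_map.mp h with ⟨q, hq, hq1⟩
    rcases List.mem_filter.mp hq with ⟨hql, hqf⟩
    rwa [pvFstInj hl hp hql hq1.symm]
  · intro h
    exact List.mem_map.mpr ⟨p, List.mem_filter.mpr ⟨hp, h⟩, rfl⟩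

-- B's accumulation loop is a filter of the enumerate list
theorem pvFoldB (rest : List (List Int)) :
    ∀ (l : List (Int × Int)) (acc : List Int),
    l.Pairwise (fun a b => a.1 < b.1) → (∀ p ∈ l, p.1 ∉ acc) →
    l.foldl (fun (acc : PySem.Set Int) p => if altCertain rest p.1 p.2 then acc else PySem.Set.add acc p.1) acc
      = acc ++ (l.filter (fun p => !altCertain rest p.1 p.2)).map (·.1) := by
  intro l
  induction l with
  | nil => intro acc _ _; simp
  | cons p tl ih =>
    intro acc hl hacc
    rcases List.pairwise_cons.mp hl with ⟨hp, htl⟩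
    by_cases hc : altCertain rest p.1 p.2
    · simp only [List.foldl_cons, if_pos hc]
      rw [ih acc htl (fun q hq => hacc q (List.mem_cons_of_mem _ hq))]
      simp [hc]
    · simp only [List.foldl_cons, if_neg hc]
      rw [pvAddNotMem acc p.1 (hacc p List.mem_cons_self)]
      rw [ih (acc ++ [p.1]) htl ?_]
      · simp [hc]
      · intro q hq
        simp only [List.mem_append, List.mem_singleton]
        rintro (h | h)
        · exact hacc q (List.mem_cons_of_mem _ hq) h
        · have := hp q hq; omega

-- A's first loop: the three sets it builds, as filters of the enumerate list
theorem pvFoldA1 :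
    ∀ (l : List (Int × Int)) (u on off : List Int),
    l.Pairwise (fun a b => a.1 < b.1) →
    (∀ p ∈ l, p.1 ∉ u) → (∀ p ∈ l, p.1 ∉ on) → (∀ p ∈ l, p.1 ∉ off) →
    l.foldl (fun (st : PySem.Set Int × PySem.Set Int × PySem.Set Int) p =>
            if p.2 == 1 then (PySem.Set.add st.1 p.1, PySem.Set.add st.2.1 p.1, st.2.2)
            else if p.2 == 0 then (PySem.Set.add st.1 p.1, st.2.1, PySem.Set.add st.2.2 p.1)
            else (PySem.Set.add st.1 p.1, st.2.1, st.2.2)) (u, on, off)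
      = (u ++ l.map (·.1),
         on ++ (l.filter (fun p => p.2 == 1)).map (·.1),
         off ++ (l.filter (fun p => !(p.2 == 1) && (p.2 == 0))).map (·.1)) := by
  intro l
  induction l with
  | nil => intro u on off _ _ _ _; simp
  | cons p tl ih =>
    intro u on off hl hu hon hoff
    rcases List.pairwise_cons.mp hl with ⟨hp, htl⟩
    have hnext : ∀ (s : List Int), (∀ q ∈ p :: tl, q.1 ∉ s) → ∀ q ∈ tl, q.1 ∉ s ++ [p.1] := by
      intro s hs q hq
      simp only [List.mem_append, List.mem_singleton]
      rintro (h | h)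
      · exact hs q (List.mem_cons_of_mem _ hq) h
      · have := hp q hq; omega
    have htail : ∀ (s : List Int), (∀ q ∈ p :: tl, q.1 ∉ s) → ∀ q ∈ tl, q.1 ∉ s :=
      fun s hs q hq => hs q (List.mem_cons_of_mem _ hq)
    rw [List.foldl_cons]
    by_cases h1 : p.2 == 1
    · simp only [if_pos h1]
      rw [pvAddNotMem u p.1 (hu p List.mem_cons_self),
          pvAddNotMem on p.1 (hon p List.mem_cons_self)]
      rw [ih (u ++ [p.1]) (on ++ [p.1]) off htl (hnext u hu) (hnext on hon) (htail off hoff)]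
      simp [h1]
    · by_cases h0 : p.2 == 0
      · simp only [if_neg h1, if_pos h0]
        rw [pvAddNotMem u p.1 (hu p List.mem_cons_self),
            pvAddNotMem off p.1 (hoff p List.mem_cons_self)]
        rw [ih (u ++ [p.1]) on (off ++ [p.1]) htl (hnext u hu) (htail on hon) (hnext off hoff)]
        simp [h1, h0]
      · simp only [if_neg h1, if_neg h0]
        rw [pvAddNotMem u p.1 (hu p List.mem_cons_self)]
        rw [ih (u ++ [p.1]) on off htl (hnext u hu) (htail on hon) (htail off hoff)]
        simp [h1, h0]

-- A's erasure loop over one later solution = a pair of filters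
theorem pvFoldA2inner :
    ∀ (l : List (Int × Int)) (on off : List Int),
    l.foldl (fun (st2 : PySem.Set Int × PySem.Set Int) p =>
        if p.2 == 1 then (st2.1, PySem.Set.discard st2.2 p.1)
        else if p.2 == 0 then (PySem.Set.discard st2.1 p.1, st2.2)
        else st2) (on, off)
    = (on.filter (fun i => !(l.any (fun p => (p.2 == 0) && (p.1 == i)))),
       off.filter (fun i => !(l.any (fun p => (p.2 == 1) && (p.1 == i))))) := by
  intro l
  induction l with
  | nil => intro on off; simp
  | cons p tl ih =>
    intro on off
    rw [List.foldl_cons]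
    by_cases h1 : p.2 == 1
    · have h1' : p.2 = 1 := by simpa using h1
      simp only [if_pos h1]
      rw [pvDiscardFilter, ih, List.filter_filter]
      congr 1
      · apply List.filter_congr; intro i _; simp [List.any_cons, h1']
      · apply List.filter_congr; intro i _
        by_cases hi : p.1 = i
        · simp [List.any_cons, h1', hi, bne]
        · have e1 : (i == p.1) = false := by simp; intro h; exact hi h.symm
          have e2 : (p.1 == i) = false := by simp [hi]
          simp [List.any_cons, h1', e2, Bool.and_comm]
          intro _ h; exact hi h.symm
    · by_cases h0 : p.2 == 0
      · have h0' : p.2 = 0 := by simpa using h0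
        simp only [if_neg h1, if_pos h0]
        rw [pvDiscardFilter, ih, List.filter_filter]
        congr 1
        · apply List.filter_congr; intro i _
          by_cases hi : p.1 = i
          · simp [List.any_cons, h0', hi, bne]
          · have e1 : (i == p.1) = false := by simp; intro h; exact hi h.symm
            have e2 : (p.1 == i) = false := by simp [hi]
            simp [List.any_cons, h0', e2, Bool.and_comm]
            intro _ h; exact hi h.symm
        · apply List.filter_congr; intro i _; simp [List.any_cons, h0']
      · have h1'' : (p.2 == 1) = false := by simpa using h1
        have h0'' : (p.2 == 0) = false := by simpa using h0
        simp only [if_neg h1, if_neg h0]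
        rw [ih]
        congr 1
        · apply List.filter_congr; intro i _; simp [List.any_cons, h0'']
        · apply List.filter_congr; intro i _; simp [List.any_cons, h1'']

-- A's erasure loops over all later solutions
theorem pvFoldA2 (rest : List (List Int)) :
    ∀ (on off : List Int),
    rest.foldl (fun (st : PySem.Set Int × PySem.Set Int) sol =>
        (PySem.List.enumerate sol 0).foldl
          (fun (st2 : PySem.Set Int × PySem.Set Int) p =>
            if p.2 == 1 then (st2.1, PySem.Set.discard st2.2 p.1)
            else if p.2 == 0 then (PySem.Set.discard st2.1 p.1, st2.2)
            else st2) st) (on, off)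
    = (on.filter (fun i => !(rest.any (pvFlip 0 i))),
       off.filter (fun i => !(rest.any (pvFlip 1 i)))) := by
  induction rest with
  | nil => intro on off; simp
  | cons s tl ih =>
    intro on off
    rw [List.foldl_cons, pvFoldA2inner (PySem.List.enumerate s 0) on off, ih,
        List.filter_filter, List.filter_filter]
    congr 1
    · apply List.filter_congr; intro i _; simp [List.any_cons, pvFlip, Bool.and_comm]
    · apply List.filter_congr; intro i _; simp [List.any_cons, pvFlip, Bool.and_comm]

-- A's "bit w occurs at i" test = B's guarded direct index, for a natural index
theorem pvAnyFlipZero (s : List Int) (w : Int) (i : Nat) :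
    (PySem.List.enumerate s 0).any (fun p => (p.2 == w) && (p.1 == (i : Int)))
      = (decide ((i : Int) < (s.length : Int)) && ((s.getD i 0) == w)) := by
  by_cases hi : i < s.length
  · have hgd : s.getD i 0 = s[i] := List.getD_eq_getElem s 0 hi
    have hd : decide ((i : Int) < (s.length : Int)) = true := by simp; exact_mod_cast hi
    rw [hd, Bool.true_and, hgd]
    cases hw : s[i] == w with
    | true =>
      apply List.any_eq_true.mpr
      exact ⟨((0 : Int) + i, s[i]), (PySem.List.mem_enumerate_iff _ _ _).mpr ⟨i, hi, rfl⟩,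
        by simp [hw]⟩
    | false =>
      apply List.any_eq_false.mpr
      intro p hp
      rcases (PySem.List.mem_enumerate_iff _ _ _).mp hp with ⟨k, hk, hpk⟩
      subst hpk
      simp only [Bool.and_eq_true, beq_iff_eq, not_and]
      intro h2 h1
      have hki : k = i := by omega
      subst hki
      rw [h2] at hw
      simp at hw
  · have hd : decide ((i : Int) < (s.length : Int)) = false := by simp; omega
    rw [hd, Bool.false_and]
    apply List.any_eq_false.mpr
    intro p hp
    rcases (PySem.List.mem_enumerate_iff _ _ _).mp hp with ⟨k, hk, hpk⟩
    subst hpk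
    simp only [Bool.and_eq_true, beq_iff_eq, not_and]
    intro _ h1
    omega

-- ===== VERDICT (by name: the statement is the Claim_ definition above) =====
theorem get_all_line_uncertain_indexes_spec : Claim_equal_get_all_line_uncertain_indexes := by
  intro domains is_col index _ _
  unfold Spec_get_all_line_uncertain_indexes
  unfold get_all_line_uncertain_indexes get_all_line_uncertain_indexes_alt
  cases hlk : (List.lookup is_col domains).bind (fun row => List.lookup index row) with
  | none => rfl
  | some sols =>
    cases sols with
    | nil => rfl
    | cons first rest =>
      simp only [PySem.List.pyGet?_zero_cons, PySem.List.slice_from_one, List.tail_cons]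
      rw [pvFoldA1 (PySem.List.enumerate first 0) PySem.Set.empty PySem.Set.empty PySem.Set.empty
            (PySem.List.pairwise_lt_enumerate first 0) (by simp) (by simp) (by simp)]
      rw [pvFoldB rest (PySem.List.enumerate first 0) PySem.Set.empty
            (PySem.List.pairwise_lt_enumerate first 0) (by simp)]
      simp only []
      rw [pvFoldA2 rest]
      simp only [PySem.Set.empty, List.nil_append]
      rw [pvDiffFilter, pvDiffFilter, List.filter_filter, List.filter_map]
      congr 1
      apply List.filter_congr
      intro p hp
      simp only [Function.comp]
      have hpl := PySem.List.pairwise_lt_enumerate first 0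
      have honm := pvMemFstFilter hpl (fun q => q.2 == 1) hp
      have hoffm := pvMemFstFilter hpl (fun q => !(q.2 == 1) && (q.2 == 0)) hp
      rcases (PySem.List.mem_enumerate_iff _ _ _).mp hp with ⟨k, hk, hpk⟩
      rw [Bool.eq_iff_iff]
      simp only [List.contains_eq_mem, List.mem_filter, altCertain,
        Bool.and_eq_true, Bool.not_eq_true', decide_eq_false_iff_not,
        not_and, honm, hoffm]
      subst hpk
      simp only [zero_add]
      by_cases hb1 : first[k] == 1
      · simp [hb1, pvFlip, pvAnyFlipZero, PySem.List.pyGetD_natCast]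
      · by_cases hb0 : first[k] == 0
        · simp [hb1, hb0, pvFlip, pvAnyFlipZero, PySem.List.pyGetD_natCast]
        · simp [hb1, hb0, pvFlip, pvAnyFlipZero]
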